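-- pv_equiv track=rewrite | github.com/remarqUK/resistance | fx_sr/db.py | _rewrite_named_placeholders
-- ===== SOURCE A (Python) =====
-- def _rewrite_named_placeholders(sql: str) -> tuple[str, list[str]]:
--     names: list[str] = []
--     out: list[str] = []
--     in_single = False
--     in_double = False
--     i = 0
--     while i < len(sql):
--         ch = sql[i]
--         if ch == "'" and not in_double:
--             in_single = not in_single
--             out.append(ch)
--             i += 1
--             continue
--         if ch == '"' and not in_single:
--             in_double = not in_double
--             out.append(ch)
--             i += 1
--             continue
--         if not in_single and not in_double and ch == ':':
--             if i + 1 < len(sql) and (sql[i + 1].isalpha() or sql[i + 1] == '_'):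
--                 j = i + 1
--                 while j < len(sql) and (sql[j].isalnum() or sql[j] == '_'):
--                     j += 1
--                 names.append(sql[i + 1 : j])
--                 out.append('%s')
--                 i = j
--                 continue
--         out.append(ch)
--         i += 1
--     return ''.join(out), names
-- ===== SOURCE B (Python) =====
-- def _ident_prefix(s):
--     """Longest prefix of s made of identifier characters (takewhile)."""
--     for k, c in enumerate(s):
--         if not (c.isalnum() or c == '_'):
--             return s[:k]
--     return s
--
--
-- def _tokenize(sql):
--     """Split sql into tokens: (False, literal text) or (True, placeholder name)."""
--     toks = []
--     s = sql
--     while s: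
--         ch = s[0]
--         if ch in "'\"":
--             body, sep, s = s[1:].partition(ch)
--             toks.append((False, ch + body + sep))
--         elif ch == ':' and len(s) > 1 and (s[1].isalpha() or s[1] == '_'):
--             name = _ident_prefix(s[1:])
--             toks.append((True, name))
--             s = s[1 + len(name):]
--         else:
--             toks.append((False, ch))
--             s = s[1:]
--     return toks
--
--
-- def _rewrite_named_placeholders(sql: str) -> tuple[str, list[str]]:
--     toks = _tokenize(sql)
--     rewritten = ''.join('%s' if is_name else text for is_name, text in toks)
--     names = [text for is_name, text in toks if is_name]
--     return rewritten, names
-- ===== Notes on version B (the rewrite author's own statement) =====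
-- stated objective: alternative
-- what changed: Replaces A's single stateful pass (in_single/in_double toggles, out and names built together) by a tokenizer that splits the string into literal/placeholder tokens (quoted spans consumed whole via str.partition on the remaining suffix), followed by two separate passes that render the rewritten text and collect the names from the token list.
import Mathlib
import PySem

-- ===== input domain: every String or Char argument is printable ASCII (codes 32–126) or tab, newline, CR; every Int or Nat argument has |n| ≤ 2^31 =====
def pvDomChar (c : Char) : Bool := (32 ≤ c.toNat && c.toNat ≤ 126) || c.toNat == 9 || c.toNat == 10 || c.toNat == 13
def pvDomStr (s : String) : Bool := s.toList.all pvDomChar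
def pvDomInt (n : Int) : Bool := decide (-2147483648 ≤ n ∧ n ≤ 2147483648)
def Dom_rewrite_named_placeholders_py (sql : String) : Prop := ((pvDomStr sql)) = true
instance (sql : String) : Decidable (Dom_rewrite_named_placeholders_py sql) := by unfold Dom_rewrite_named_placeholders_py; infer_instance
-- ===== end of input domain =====

-- B tokenizes the SQL into literal/placeholder tokens (quoted spans consumed whole) and then
-- renders the output string and the name list in two separate passes over the token list,
-- instead of A's single stateful character loop with in_single/in_double toggles.
-- In both ports Python's list of string fragments is ported as a list of characters.

-- shared character classes (sql[k].isalnum() or sql[k] == '_', resp. isalpha or '_')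
def pvIdentChar (c : Char) : Bool := PySem.Chars.isalnum c || c == '_'
def pvIdentStart (c : Char) : Bool := PySem.Chars.isalpha c || c == '_'

-- ===== PORT A =====
-- A's inner j-loop: the identifier characters after ':' and the remainder of the string
def pvASpan : List Char → List Char × List Char
  | [] => ([], [])
  | c :: rest =>
    if pvIdentChar c then ((pvASpan rest).1.cons c, (pvASpan rest).2)
    else ([], c :: rest)

theorem pvASpan_snd_le (s : List Char) : (pvASpan s).2.length ≤ s.length := by
  induction s with
  | nil => simp [pvASpan]
  | cons c rest ih =>
    simp only [pvASpan]
    split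
    · simpa using Nat.le_succ_of_le ih
    · simp

-- A's while loop: the remaining characters, the two quote flags, out and names accumulators
def pvALoop : List Char → Bool → Bool → List Char → List (List Char) → List Char × List (List Char)
  | [], _, _, out, names => (out, names)
  | c :: rest, insgl, indbl, out, names =>
    if c == '\'' && !indbl then
      pvALoop rest (!insgl) indbl (out ++ [c]) names
    else if c == '"' && !insgl then
      pvALoop rest insgl (!indbl) (out ++ [c]) names
    else if !insgl && !indbl && c == ':' &&
        (match rest with | d :: _ => pvIdentStart d | [] => false) then
      pvALoop (pvASpan rest).2 insgl indbl (out ++ ['%', 's']) (names ++ [(pvASpan rest).1])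
    else
      pvALoop rest insgl indbl (out ++ [c]) names
  termination_by cs _ _ _ _ => cs.length
  decreasing_by
    · simp
    · simp
    · exact Nat.lt_succ_of_le (pvASpan_snd_le rest)
    · simp

def rewrite_named_placeholders_py (sql : String) : String × List String :=
  (String.ofList (pvALoop sql.toList false false [] []).1,
   (pvALoop sql.toList false false [] []).2.map String.ofList)

-- ===== PORT B =====
-- s.partition(q): (before, sep, after) where sep is [q] if found, else (s, [], [])
def pvPartition : List Char → Char → List Char × List Char × List Char
  | [], _ => ([], [], [])
  | c :: rest, q =>
    if c == q then ([], [q], rest)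
    else ((pvPartition rest q).1.cons c, (pvPartition rest q).2.1, (pvPartition rest q).2.2)

theorem pvPartition_after_le (s : List Char) (q : Char) :
    (pvPartition s q).2.2.length ≤ s.length := by
  induction s with
  | nil => simp [pvPartition]
  | cons c rest ih =>
    simp only [pvPartition]
    split
    · simp
    · simpa using Nat.le_succ_of_le ih

-- _ident_prefix: longest prefix of identifier characters
def pvIdentPrefix : List Char → List Char
  | [] => []
  | c :: rest => if pvIdentChar c then c :: pvIdentPrefix rest else []

-- _tokenize: each token is (is_placeholder_name, text)
def pvTokenize : List Char → List (Bool × List Char)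
  | [] => []
  | c :: rest =>
    if c == '\'' || c == '"' then
      (false, c :: (pvPartition rest c).1 ++ (pvPartition rest c).2.1)
        :: pvTokenize (pvPartition rest c).2.2
    else if c == ':' &&
        (match rest with | d :: _ => pvIdentStart d | [] => false) then
      (true, pvIdentPrefix rest) :: pvTokenize (rest.drop (pvIdentPrefix rest).length)
    else
      (false, [c]) :: pvTokenize rest
  termination_by cs => cs.length
  decreasing_by
    · exact Nat.lt_succ_of_le (pvPartition_after_le rest c)
    · exact Nat.lt_succ_of_le (by simp)
    · simp

def rewrite_named_placeholders_py_alt (sql : String) : String × List String :=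
  let toks := pvTokenize sql.toList
  (String.ofList (toks.flatMap fun t => if t.1 then ['%', 's'] else t.2),
   ((toks.filter (·.1)).map fun t => String.ofList t.2))

-- ===== PRECONDITION & SPEC =====
def Spec_rewrite_named_placeholders_py (sql : String) (out : String × List String) : Prop := out = rewrite_named_placeholders_py_alt sql
instance (sql : String) (out : String × List String) : Decidable (Spec_rewrite_named_placeholders_py sql out) := by unfold Spec_rewrite_named_placeholders_py; infer_instance

-- ===== CLAIM (what is proved, stated in full; the proofs are below) =====
def Claim_equal_rewrite_named_placeholders_py : Prop := ∀ (sql : String), Dom_rewrite_named_placeholders_py sql → Spec_rewrite_named_placeholders_py sql (rewrite_named_placeholders_py sql)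

-- ===== LEMMAS AND PROOFS =====

-- Inside a single-quoted span A copies characters literally until the next ' toggles the flag off.
theorem pvALoop_single (cs : List Char) : ∀ out names,
    pvALoop cs true false out names =
      pvALoop (pvPartition cs '\'').2.2 false false
        (out ++ (pvPartition cs '\'').1 ++ (pvPartition cs '\'').2.1) names := by
  induction cs with
  | nil => intro out names; rw [pvALoop.eq_def]; simp [pvPartition, pvALoop]
  | cons c rest ih =>
    intro out names
    rw [pvALoop.eq_def]
    by_cases hc : c = '\''
    · subst hc
      simp [pvPartition]
    · have h1 : (c == '\'') = false := by simp [hc]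
      simp only [h1, Bool.false_and, Bool.and_false, Bool.not_true, Bool.false_eq_true, if_false,
        Bool.false_and, pvPartition]
      rw [ih]
      simp

-- Inside a double-quoted span A copies characters literally until the next " toggles the flag off.
theorem pvALoop_double (cs : List Char) : ∀ out names,
    pvALoop cs false true out names =
      pvALoop (pvPartition cs '"').2.2 false false
        (out ++ (pvPartition cs '"').1 ++ (pvPartition cs '"').2.1) names := by
  induction cs with
  | nil => intro out names; rw [pvALoop.eq_def]; simp [pvPartition, pvALoop]
  | cons c rest ih =>
    intro out names
    rw [pvALoop.eq_def]
    by_cases hc : c = '"'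
    · subst hc
      simp [pvPartition]
    · have h1 : (c == '"') = false := by simp [hc]
      simp only [h1, Bool.and_false, Bool.not_true, Bool.false_eq_true, if_false,
        Bool.false_and, pvPartition]
      rw [ih]
      simp

-- A's inner identifier scan computes the identifier prefix and drops it from the suffix.
theorem pvASpan_eq (s : List Char) :
    pvASpan s = (pvIdentPrefix s, s.drop (pvIdentPrefix s).length) := by
  induction s with
  | nil => simp [pvASpan, pvIdentPrefix]
  | cons c rest ih =>
    by_cases hc : pvIdentChar c
    · simp [pvASpan, pvIdentPrefix, hc, ih]
    · simp [pvASpan, pvIdentPrefix, hc]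

-- rendering of a token list
def pvRender (toks : List (Bool × List Char)) : List Char :=
  toks.flatMap fun t => if t.1 then ['%', 's'] else t.2

def pvNames (toks : List (Bool × List Char)) : List (List Char) :=
  (toks.filter (·.1)).map (·.2)

-- A's loop from the neutral state accumulates exactly B's rendered tokens and names.
theorem pvLoop_eq (n : Nat) : ∀ cs : List Char, cs.length ≤ n → ∀ out names,
    pvALoop cs false false out names =
      (out ++ pvRender (pvTokenize cs), names ++ pvNames (pvTokenize cs)) := by
  induction n with
  | zero =>
    intro cs h out names
    have hnil : cs = [] := List.eq_nil_of_length_eq_zero (Nat.le_zero.mp h)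
    subst hnil
    rw [pvALoop.eq_def, pvTokenize.eq_def]
    simp [pvRender, pvNames]
  | succ n ih =>
    intro cs h out names
    match cs with
    | [] =>
      rw [pvALoop.eq_def, pvTokenize.eq_def]
      simp [pvRender, pvNames]
    | c :: rest =>
      have hr : rest.length ≤ n := by
        have := Nat.lt_of_lt_of_le (by simp : rest.length < (c :: rest).length) h
        omega
      rw [pvALoop.eq_def, pvTokenize.eq_def]
      by_cases hc : c = '\''
      · subst hc
        simp only [BEq.rfl, Bool.true_and, Bool.not_false, Bool.true_or, if_pos]
        rw [pvALoop_single]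
        rw [ih _ (Nat.le_trans (pvPartition_after_le rest _) hr)]
        simp [pvRender, pvNames]
      · by_cases hd : c = '"'
        · subst hd
          simp only [show ('"' == '\'') = false by decide, Bool.false_and, Bool.false_eq_true,
            if_false, BEq.rfl, Bool.not_false, Bool.true_and, Bool.or_true, if_pos]
          rw [pvALoop_double]
          rw [ih _ (Nat.le_trans (pvPartition_after_le rest _) hr)]
          simp [pvRender, pvNames]
        · have h1 : (c == '\'') = false := by simp [hc]
          have h2 : (c == '"') = false := by simp [hd]
          simp only [h1, h2, Bool.false_and, Bool.false_eq_true, if_false,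
            Bool.false_or, Bool.not_false, Bool.true_and]
          match rest, hr with
          | [], hr =>
            simp only [Bool.and_false, Bool.false_eq_true, if_false]
            rw [ih _ hr]
            rw [pvTokenize.eq_def]
            simp [pvRender, pvNames]
          | d :: rest', hr =>
            have hm : (match d :: rest' with | e :: _ => pvIdentStart e | [] => false)
                = pvIdentStart d := rfl
            rw [hm]
            by_cases h3 : (c == ':' && pvIdentStart d) = true
            · rw [if_pos h3, if_pos h3, pvASpan_eq]
              rw [ih _ (Nat.le_trans (by simp) hr)]
              simp [pvRender, pvNames]
            · rw [if_neg h3, if_neg h3]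
              rw [ih _ hr]
              simp [pvRender, pvNames]

-- ===== VERDICT (by name: the statement is the Claim_ definition above) =====
theorem rewrite_named_placeholders_py_spec : Claim_equal_rewrite_named_placeholders_py := by
  intro sql _
  unfold Spec_rewrite_named_placeholders_py rewrite_named_placeholders_py rewrite_named_placeholders_py_alt
  rw [pvLoop_eq sql.toList.length sql.toList (le_refl _)]
  simp [pvRender, pvNames]
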